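-- pv_equiv track=rewrite | github.com/frostyeti/binget-pkgs | generate_10_versions.py | identify_asset
-- ===== SOURCE A (Python) =====
-- def identify_asset(name, os_name, arch):
--     name = name.lower()
--     if os_name == 'windows':
--         if any(x in name for x in ['linux', 'darwin', 'mac', 'freebsd', 'apple', '.dmg', '.deb', '.rpm', '.apk', '.appimage']): return False
--         if not ('win' in name or 'windows' in name) and not (name.endswith('.exe') or name.endswith('.msi') or name.endswith('.zip')): return False
--     elif os_name == 'macos':
--         if any(x in name for x in ['windows', 'win64', 'win32', 'linux', 'freebsd', '.exe', '.msi', '.deb', '.rpm', '.apk', '.appimage']): return False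
--         if not ('mac' in name or 'darwin' in name or 'apple' in name) and not name.endswith('.dmg'):
--             if not (name.endswith('.dmg') or name.endswith('.zip') or name.endswith('.tar.gz')): return False
--     elif os_name == 'linux':
--         if any(x in name for x in ['windows', 'win64', 'win32', 'darwin', 'mac', 'apple', 'freebsd', '.exe', '.msi', '.dmg']): return False
--         if not ('linux' in name) and not (name.endswith('.deb') or name.endswith('.rpm') or name.endswith('.appimage') or name.endswith('.apk')):
--             if not (name.endswith('.tar.gz') or name.endswith('.tar.xz')): return False
--
--     if arch == 'amd64':
--         if any(x in name for x in ['arm', 'aarch64', '386', 'i386', 'ppc64', 's390x']): return False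
--     elif arch == 'aarch64':
--         if any(x in name for x in ['amd64', 'x86_64', '64bit', '386', 'i386', 'ppc64', 's390x']): return False
--
--     if any(name.endswith(x) for x in ['.sha256', '.sha256sum', '.md5', '.sig', '.pem', '.sbom', '.sbom.json', '.pub', '.txt']): return False
--
--     return True
-- ===== SOURCE B (Python) =====
-- # Feature-extraction re-implementation: one left-to-right scan over the name
-- # collects which marker tokens occur (a simple multi-pattern matcher), the
-- # recognised endings are classified once, and the verdict is pure set logic
-- # over those features instead of per-branch substring scans.
--
-- TOKENS = ['windows', 'win64', 'win32', 'win', 'linux', 'darwin', 'mac', 'apple',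
--           'freebsd', '.dmg', '.deb', '.rpm', '.apk', '.appimage', '.exe', '.msi',
--           'arm', 'aarch64', 'x86_64', 'amd64', '64bit', 'i386', '386',
--           'ppc64', 's390x']
--
-- SUFFIXES = ['.exe', '.msi', '.zip', '.dmg', '.tar.gz', '.tar.xz', '.deb', '.rpm',
--             '.appimage', '.apk', '.sha256sum', '.sha256', '.md5', '.sig', '.pem',
--             '.sbom.json', '.sbom', '.pub', '.txt']
--
-- OS_RULES = {
--     'windows': ({'linux', 'darwin', 'mac', 'freebsd', 'apple', '.dmg', '.deb', '.rpm', '.apk', '.appimage'},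
--                 {'win'},
--                 {'.exe', '.msi', '.zip'}),
--     'macos':   ({'windows', 'win64', 'win32', 'linux', 'freebsd', '.exe', '.msi', '.deb', '.rpm', '.apk', '.appimage'},
--                 {'mac', 'darwin', 'apple'},
--                 {'.dmg', '.zip', '.tar.gz'}),
--     'linux':   ({'windows', 'win64', 'win32', 'darwin', 'mac', 'apple', 'freebsd', '.exe', '.msi', '.dmg'},
--                 {'linux'},
--                 {'.deb', '.rpm', '.appimage', '.apk', '.tar.gz', '.tar.xz'}),
-- }
--
-- ARCH_RULES = {
--     'amd64':   {'arm', 'aarch64', '386', 'i386', 'ppc64', 's390x'},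
--     'aarch64': {'amd64', 'x86_64', '64bit', '386', 'i386', 'ppc64', 's390x'},
-- }
--
-- META = {'.sha256', '.sha256sum', '.md5', '.sig', '.pem', '.sbom', '.sbom.json', '.pub', '.txt'}
--
--
-- def identify_asset(name, os_name, arch):
--     n = name.lower()
--     found = set()
--     for i in range(len(n)):
--         for t in TOKENS:
--             if n[i:i + len(t)] == t:
--                 found.add(t)
--     ends = {s for s in SUFFIXES if n.endswith(s)}
--     rule = OS_RULES.get(os_name)
--     if rule is not None:
--         excl, kw, suf = rule
--         if found & excl or not (found & kw or ends & suf):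
--             return False
--     if found & ARCH_RULES.get(arch, set()):
--         return False
--     return not (ends & META)
-- ===== Notes on version B (the rewrite author's own statement) =====
-- stated objective: alternative
-- what changed: Instead of A's per-branch substring/endswith scans, B makes one positional scan over the name that collects every occurring marker token into a feature set, classifies the name's endings once, and decides each rule by set intersections against per-OS/arch rule tables.
import Mathlib
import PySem

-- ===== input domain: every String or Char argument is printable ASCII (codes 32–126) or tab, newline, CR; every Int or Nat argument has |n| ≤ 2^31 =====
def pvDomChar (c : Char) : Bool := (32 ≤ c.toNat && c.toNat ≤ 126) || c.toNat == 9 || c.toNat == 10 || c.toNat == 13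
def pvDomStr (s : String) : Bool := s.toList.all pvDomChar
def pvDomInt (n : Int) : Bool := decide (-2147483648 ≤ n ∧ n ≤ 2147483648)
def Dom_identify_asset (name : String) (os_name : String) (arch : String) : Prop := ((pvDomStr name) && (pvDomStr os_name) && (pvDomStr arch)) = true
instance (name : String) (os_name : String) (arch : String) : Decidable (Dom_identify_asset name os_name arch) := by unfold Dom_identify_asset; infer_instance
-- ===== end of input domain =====

-- B replaces A's per-branch substring scans by one positional scan over the name that collects the occurring marker tokens, a one-pass ending classification, and a pure set-logic verdict (objective: alternative); return values proved equal.


-- ===== PORT A =====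
-- A-side helper: the code after the os_name chain (arch checks, then suffix blacklist, then `return True`)
def idA_tail (name : String) (arch : String) : Bool :=
  if arch = "amd64" then
    if (["arm", "aarch64", "386", "i386", "ppc64", "s390x"]).any (fun x => PySem.Str.isIn x name) then false
    else if (([".sha256", ".sha256sum", ".md5", ".sig", ".pem", ".sbom", ".sbom.json", ".pub", ".txt"]).any (fun x => PySem.Str.endswith name x)) then false
    else true
  else if arch = "aarch64" then
    if (["amd64", "x86_64", "64bit", "386", "i386", "ppc64", "s390x"]).any (fun x => PySem.Str.isIn x name) then false
    else if (([".sha256", ".sha256sum", ".md5", ".sig", ".pem", ".sbom", ".sbom.json", ".pub", ".txt"]).any (fun x => PySem.Str.endswith name x)) then false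
    else true
  else
    if (([".sha256", ".sha256sum", ".md5", ".sig", ".pem", ".sbom", ".sbom.json", ".pub", ".txt"]).any (fun x => PySem.Str.endswith name x)) then false
    else true

def identify_asset (name : String) (os_name : String) (arch : String) : Bool :=
  let name := PySem.Str.lower name
  if os_name = "windows" then
    if (["linux", "darwin", "mac", "freebsd", "apple", ".dmg", ".deb", ".rpm", ".apk", ".appimage"]).any (fun x => PySem.Str.isIn x name) then false
    else if !(PySem.Str.isIn "win" name || PySem.Str.isIn "windows" name)
         && !(PySem.Str.endswith name ".exe" || PySem.Str.endswith name ".msi" || PySem.Str.endswith name ".zip") then false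
    else idA_tail name arch
  else if os_name = "macos" then
    if (["windows", "win64", "win32", "linux", "freebsd", ".exe", ".msi", ".deb", ".rpm", ".apk", ".appimage"]).any (fun x => PySem.Str.isIn x name) then false
    else if !(PySem.Str.isIn "mac" name || PySem.Str.isIn "darwin" name || PySem.Str.isIn "apple" name)
         && !(PySem.Str.endswith name ".dmg") then
      if !(PySem.Str.endswith name ".dmg" || PySem.Str.endswith name ".zip" || PySem.Str.endswith name ".tar.gz") then false
      else idA_tail name arch
    else idA_tail name arch
  else if os_name = "linux" then
    if (["windows", "win64", "win32", "darwin", "mac", "apple", "freebsd", ".exe", ".msi", ".dmg"]).any (fun x => PySem.Str.isIn x name) then false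
    else if !(PySem.Str.isIn "linux" name)
         && !(PySem.Str.endswith name ".deb" || PySem.Str.endswith name ".rpm" || PySem.Str.endswith name ".appimage" || PySem.Str.endswith name ".apk") then
      if !(PySem.Str.endswith name ".tar.gz" || PySem.Str.endswith name ".tar.xz") then false
      else idA_tail name arch
    else idA_tail name arch
  else idA_tail name arch

-- ===== PORT B =====
-- B-side constants (TOKENS, SUFFIXES, OS_RULES, ARCH_RULES, META from Source B)
def idB_tokens : List String :=
  ["windows", "win64", "win32", "win", "linux", "darwin", "mac", "apple",
   "freebsd", ".dmg", ".deb", ".rpm", ".apk", ".appimage", ".exe", ".msi",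
   "arm", "aarch64", "x86_64", "amd64", "64bit", "i386", "386", "ppc64", "s390x"]

def idB_suffixes : List String :=
  [".exe", ".msi", ".zip", ".dmg", ".tar.gz", ".tar.xz", ".deb", ".rpm",
   ".appimage", ".apk", ".sha256sum", ".sha256", ".md5", ".sig", ".pem",
   ".sbom.json", ".sbom", ".pub", ".txt"]

def idB_osRules : PySem.Dict String (PySem.Set String × PySem.Set String × PySem.Set String) :=
  PySem.Dict.ofList
    [ ("windows", (PySem.Set.ofList ["linux", "darwin", "mac", "freebsd", "apple", ".dmg", ".deb", ".rpm", ".apk", ".appimage"],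
                   PySem.Set.ofList ["win"],
                   PySem.Set.ofList [".exe", ".msi", ".zip"])),
      ("macos",   (PySem.Set.ofList ["windows", "win64", "win32", "linux", "freebsd", ".exe", ".msi", ".deb", ".rpm", ".apk", ".appimage"],
                   PySem.Set.ofList ["mac", "darwin", "apple"],
                   PySem.Set.ofList [".dmg", ".zip", ".tar.gz"])),
      ("linux",   (PySem.Set.ofList ["windows", "win64", "win32", "darwin", "mac", "apple", "freebsd", ".exe", ".msi", ".dmg"],
                   PySem.Set.ofList ["linux"],
                   PySem.Set.ofList [".deb", ".rpm", ".appimage", ".apk", ".tar.gz", ".tar.xz"])) ]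

def idB_archRules : PySem.Dict String (PySem.Set String) :=
  PySem.Dict.ofList
    [ ("amd64",   PySem.Set.ofList ["arm", "aarch64", "386", "i386", "ppc64", "s390x"]),
      ("aarch64", PySem.Set.ofList ["amd64", "x86_64", "64bit", "386", "i386", "ppc64", "s390x"]) ]

def idB_meta : PySem.Set String :=
  PySem.Set.ofList [".sha256", ".sha256sum", ".md5", ".sig", ".pem", ".sbom", ".sbom.json", ".pub", ".txt"]

-- the token scan: for i in range(len(n)): for t in TOKENS: if n[i:i+len(t)] == t: found.add(t)
def idB_found (n : String) : PySem.Set String :=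
  (PySem.List.pyRange 0 (PySem.Str.len n) 1).foldl
    (fun s i => idB_tokens.foldl
      (fun s t => if PySem.Str.slice n (some i) (some (i + PySem.Str.len t)) == t then PySem.Set.add s t else s) s)
    PySem.Set.empty

-- last two statements of B (the arch-rule intersection and the META-ending test)
def idB_tail (found ends : PySem.Set String) (arch : String) : Bool :=
  if !(PySem.Set.inter found (idB_archRules.getD arch PySem.Set.empty)).isEmpty then false
  else !(!(PySem.Set.inter ends idB_meta).isEmpty)

def identify_asset_alt (name : String) (os_name : String) (arch : String) : Bool :=
  let n := PySem.Str.lower name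
  let found := idB_found n
  let ends := PySem.Set.ofList (idB_suffixes.filter (fun s => PySem.Str.endswith n s))
  match idB_osRules.get? os_name with
  | some (excl, kw, suf) =>
      if !(PySem.Set.inter found excl).isEmpty
         || !(!(PySem.Set.inter found kw).isEmpty || !(PySem.Set.inter ends suf).isEmpty) then false
      else idB_tail found ends arch
  | none => idB_tail found ends arch

-- ===== PRECONDITION & SPEC =====
def Spec_identify_asset (name : String) (os_name : String) (arch : String) (out : Bool) : Prop := out = identify_asset_alt name os_name arch
instance (name : String) (os_name : String) (arch : String) (out : Bool) : Decidable (Spec_identify_asset name os_name arch out) := by unfold Spec_identify_asset; infer_instance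

-- ===== CLAIM (what is proved, stated in full; the proofs are below) =====
def Claim_equal_identify_asset : Prop := ∀ (name : String) (os_name : String) (arch : String), Dom_identify_asset name os_name arch → Spec_identify_asset name os_name arch (identify_asset name os_name arch)

-- ===== LEMMAS AND PROOFS =====

-- membership in the inner conditional-add fold over the token list
theorem mem_foldl_add_if (l : List String) (p : String → Bool) (s : PySem.Set String) (y : String) :
    y ∈ l.foldl (fun s t => if p t then PySem.Set.add s t else s) s ↔ y ∈ s ∨ (y ∈ l ∧ p y = true) := by
  induction l generalizing s with
  | nil => simp
  | cons t ts ih =>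
    simp only [List.foldl_cons, List.mem_cons, ih]
    by_cases hp : p t = true
    · simp only [hp, if_true, PySem.Set.mem_add]
      constructor
      · rintro ((h | rfl) | ⟨h, hq⟩)
        · exact Or.inl h
        · exact Or.inr ⟨Or.inl rfl, hp⟩
        · exact Or.inr ⟨Or.inr h, hq⟩
      · rintro (h | ⟨(rfl | h), hq⟩)
        · exact Or.inl (Or.inl h)
        · exact Or.inl (Or.inr rfl)
        · exact Or.inr ⟨h, hq⟩
    · rw [Bool.not_eq_true] at hp
      simp only [hp, Bool.false_eq_true, if_false]
      constructor
      · rintro (h | ⟨h, hq⟩)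
        · exact Or.inl h
        · exact Or.inr ⟨Or.inr h, hq⟩
      · rintro (h | ⟨(rfl | h), hq⟩)
        · exact Or.inl h
        · rw [hp] at hq; exact absurd hq (by simp)
        · exact Or.inr ⟨h, hq⟩

-- membership in the outer fold over the positions
theorem mem_foldl_positions (q : Int → String → Bool) (is : List Int) (s : PySem.Set String) (y : String) :
    y ∈ is.foldl (fun s i => idB_tokens.foldl
        (fun s t => if q i t then PySem.Set.add s t else s) s) s
      ↔ y ∈ s ∨ (y ∈ idB_tokens ∧ ∃ i ∈ is, q i y = true) := by
  induction is generalizing s with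
  | nil => simp
  | cons i is ih =>
    simp only [List.foldl_cons, ih, mem_foldl_add_if, List.mem_cons]
    constructor
    · rintro ((h | ⟨ht, hq⟩) | ⟨ht, i', hi', hq⟩)
      · exact Or.inl h
      · exact Or.inr ⟨ht, i, Or.inl rfl, hq⟩
      · exact Or.inr ⟨ht, i', Or.inr hi', hq⟩
    · rintro (h | ⟨ht, i', (rfl | hi'), hq⟩)
      · exact Or.inl (Or.inl h)
      · exact Or.inl (Or.inr ⟨ht, hq⟩)
      · exact Or.inr ⟨ht, i', hi', hq⟩

-- the slice test at Nat position j is "t is a prefix of n.drop j"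
theorem slice_match_iff (n t : String) (j : Nat) :
    (PySem.Str.slice n (some (j : Int)) (some ((j : Int) + PySem.Str.len t)) == t) = true
      ↔ t.toList <+: n.toList.drop j := by
  rw [beq_iff_eq, String.ext_iff, PySem.Str.toList_slice, PySem.Chars.slice_eq_listSlice]
  have h1 : (j : Int) + PySem.Str.len t = ((j + t.toList.length : Nat) : Int) := by
    rw [PySem.Str.len_eq]; push_cast; ring
  rw [h1, PySem.List.slice_natCast]
  have h2 : j + t.toList.length - j = t.toList.length := by omega
  rw [h2]
  constructor
  · intro h; rw [List.prefix_iff_eq_take]; exact h.symm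
  · intro h; exact (List.prefix_iff_eq_take.mp h).symm

-- a nonempty token occurs in the collected feature set iff it is a substring of n
theorem mem_found_iff (n t : String) (ht : t ∈ idB_tokens) (hne : t.toList ≠ []) :
    t ∈ idB_found n ↔ PySem.Str.isIn t n = true := by
  unfold idB_found
  rw [mem_foldl_positions]
  simp only [PySem.Set.empty]
  rw [PySem.Str.isIn_eq, ← PySem.Chars.exists_prefix_drop_iff_isIn]
  constructor
  · rintro (h | ⟨-, i, hi, hq⟩)
    · simp at h
    · rw [PySem.List.mem_pyRange_one] at hi
      obtain ⟨h0, _⟩ := hi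
      have hj : i = ((i.toNat : Nat) : Int) := by omega
      rw [hj, slice_match_iff] at hq
      exact ⟨i.toNat, hq⟩
  · rintro ⟨j, hj⟩
    right
    refine ⟨ht, (j : Int), ?_, ?_⟩
    · rw [PySem.List.mem_pyRange_one, PySem.Str.len_eq]
      have hlt : j < n.toList.length := by
        by_contra hge
        rw [List.drop_eq_nil_of_le (by omega)] at hj
        exact hne (List.prefix_nil.mp hj)
      omega
    · rw [slice_match_iff]; exact hj

-- the "found & set(ex)" truthiness test equals A's any-substring scan over ex
theorem inter_found_any (n : String) (ex : List String)
    (hex : ∀ t ∈ ex, t ∈ idB_tokens ∧ t.toList ≠ []) :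
    (!(PySem.Set.inter (idB_found n) (PySem.Set.ofList ex)).isEmpty)
      = ex.any (fun x => PySem.Str.isIn x n) := by
  rw [Bool.eq_iff_iff, Bool.not_eq_eq_eq_not, Bool.not_true,
      List.isEmpty_eq_false_iff_exists_mem, List.any_eq_true]
  constructor
  · rintro ⟨y, hy⟩
    rw [PySem.Set.mem_inter, PySem.Set.mem_ofList] at hy
    obtain ⟨hf, hm⟩ := hy
    obtain ⟨ht, hne⟩ := hex y hm
    exact ⟨y, hm, (mem_found_iff n y ht hne).mp hf⟩
  · rintro ⟨y, hm, hin⟩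
    obtain ⟨ht, hne⟩ := hex y hm
    exact ⟨y, (PySem.Set.mem_inter _ _ _).mpr ⟨(mem_found_iff n y ht hne).mpr hin, (PySem.Set.mem_ofList _ _).mpr hm⟩⟩

-- the "ends & set(sl)" truthiness test equals A's any-endswith scan over sl
theorem inter_ends_any (n : String) (sl : List String) (hsl : ∀ s ∈ sl, s ∈ idB_suffixes) :
    (!(PySem.Set.inter (PySem.Set.ofList (idB_suffixes.filter (fun s => PySem.Str.endswith n s))) (PySem.Set.ofList sl)).isEmpty)
      = sl.any (fun x => PySem.Str.endswith n x) := by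
  rw [Bool.eq_iff_iff, Bool.not_eq_eq_eq_not, Bool.not_true,
      List.isEmpty_eq_false_iff_exists_mem, List.any_eq_true]
  constructor
  · rintro ⟨y, hy⟩
    rw [PySem.Set.mem_inter, PySem.Set.mem_ofList, PySem.Set.mem_ofList, List.mem_filter] at hy
    exact ⟨y, hy.2, hy.1.2⟩
  · rintro ⟨y, hm, he⟩
    refine ⟨y, (PySem.Set.mem_inter _ _ _).mpr ⟨(PySem.Set.mem_ofList _ _).mpr ?_, (PySem.Set.mem_ofList _ _).mpr hm⟩⟩
    exact List.mem_filter.mpr ⟨hsl y hm, he⟩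

-- lookups in the literal rule dicts
theorem osRules_windows : idB_osRules.get? "windows" =
    some (PySem.Set.ofList ["linux", "darwin", "mac", "freebsd", "apple", ".dmg", ".deb", ".rpm", ".apk", ".appimage"],
          PySem.Set.ofList ["win"], PySem.Set.ofList [".exe", ".msi", ".zip"]) := by decide

theorem osRules_macos : idB_osRules.get? "macos" =
    some (PySem.Set.ofList ["windows", "win64", "win32", "linux", "freebsd", ".exe", ".msi", ".deb", ".rpm", ".apk", ".appimage"],
          PySem.Set.ofList ["mac", "darwin", "apple"], PySem.Set.ofList [".dmg", ".zip", ".tar.gz"]) := by decide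

theorem osRules_linux : idB_osRules.get? "linux" =
    some (PySem.Set.ofList ["windows", "win64", "win32", "darwin", "mac", "apple", "freebsd", ".exe", ".msi", ".dmg"],
          PySem.Set.ofList ["linux"], PySem.Set.ofList [".deb", ".rpm", ".appimage", ".apk", ".tar.gz", ".tar.xz"]) := by decide

theorem osRules_keys : idB_osRules.keys = ["windows", "macos", "linux"] := by decide

theorem osRules_none (k : String) (h1 : k ≠ "windows") (h2 : k ≠ "macos") (h3 : k ≠ "linux") :
    idB_osRules.get? k = none := by
  rw [PySem.Dict.get?_eq_none_iff_not_mem_keys, osRules_keys]; simp [h1, h2, h3]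

theorem archRules_amd64 : idB_archRules.getD "amd64" PySem.Set.empty =
    PySem.Set.ofList ["arm", "aarch64", "386", "i386", "ppc64", "s390x"] := by decide

theorem archRules_aarch64 : idB_archRules.getD "aarch64" PySem.Set.empty =
    PySem.Set.ofList ["amd64", "x86_64", "64bit", "386", "i386", "ppc64", "s390x"] := by decide

theorem archRules_keys : idB_archRules.keys = ["amd64", "aarch64"] := by decide

theorem archRules_none (k : String) (h1 : k ≠ "amd64") (h2 : k ≠ "aarch64") :
    idB_archRules.getD k PySem.Set.empty = PySem.Set.empty := by
  have h : idB_archRules.get? k = none := by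
    rw [PySem.Dict.get?_eq_none_iff_not_mem_keys, archRules_keys]; simp [h1, h2]
  rw [PySem.Dict.getD_eq_get?_getD, h]; rfl

theorem inter_empty_right (s : PySem.Set String) : PySem.Set.inter s PySem.Set.empty = [] := by
  simp [PySem.Set.inter, PySem.Set.empty]

-- "windows" occurring in n implies "win" occurring in n, so A's keyword test is B's
theorem or_windows_win (n : String) :
    (PySem.Str.isIn "win" n || PySem.Str.isIn "windows" n) = PySem.Str.isIn "win" n := by
  cases hw : PySem.Str.isIn "windows" n
  · simp
  · have hwin : PySem.Str.isIn "win" n = true := by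
      have h' := hw
      rw [PySem.Str.isIn_eq, PySem.Chars.isIn_iff_infix] at h'
      rw [PySem.Str.isIn_eq, PySem.Chars.isIn_iff_infix]
      exact List.IsInfix.trans (l₂ := "windows".toList) (by decide) h'
    rw [hwin]; exact Bool.true_or _

-- the two tails agree
theorem tails_eq (n : String) (arch : String) :
    idB_tail (idB_found n) (PySem.Set.ofList (idB_suffixes.filter (fun s => PySem.Str.endswith n s))) arch
      = idA_tail n arch := by
  unfold idA_tail idB_tail idB_meta
  have hmeta := inter_ends_any n [".sha256", ".sha256sum", ".md5", ".sig", ".pem", ".sbom", ".sbom.json", ".pub", ".txt"] (by decide)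
  by_cases h1 : arch = "amd64"
  · subst h1
    rw [if_pos rfl, archRules_amd64,
        inter_found_any n ["arm", "aarch64", "386", "i386", "ppc64", "s390x"] (by decide), hmeta]
    generalize ((["arm", "aarch64", "386", "i386", "ppc64", "s390x"]).any (fun x => PySem.Str.isIn x n)) = X
    generalize (([".sha256", ".sha256sum", ".md5", ".sig", ".pem", ".sbom", ".sbom.json", ".pub", ".txt"]).any (fun x => PySem.Str.endswith n x)) = M
    revert X M; decide
  · rw [if_neg h1]
    by_cases h2 : arch = "aarch64"
    · subst h2
      rw [if_pos rfl, archRules_aarch64,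
          inter_found_any n ["amd64", "x86_64", "64bit", "386", "i386", "ppc64", "s390x"] (by decide), hmeta]
      generalize ((["amd64", "x86_64", "64bit", "386", "i386", "ppc64", "s390x"]).any (fun x => PySem.Str.isIn x n)) = X
      generalize (([".sha256", ".sha256sum", ".md5", ".sig", ".pem", ".sbom", ".sbom.json", ".pub", ".txt"]).any (fun x => PySem.Str.endswith n x)) = M
      revert X M; decide
    · rw [if_neg h2, archRules_none arch h1 h2, inter_empty_right, hmeta]
      generalize (([".sha256", ".sha256sum", ".md5", ".sig", ".pem", ".sbom", ".sbom.json", ".pub", ".txt"]).any (fun x => PySem.Str.endswith n x)) = M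
      revert M; decide

-- ===== VERDICT (by name: the statement is the Claim_ definition above) =====
theorem identify_asset_spec : Claim_equal_identify_asset := by
  intro name os_name arch _
  unfold Spec_identify_asset
  by_cases h1 : os_name = "windows"
  · subst h1
    simp only [identify_asset, identify_asset_alt, osRules_windows]
    rw [if_pos trivial]
    rw [inter_found_any (PySem.Str.lower name) ["linux", "darwin", "mac", "freebsd", "apple", ".dmg", ".deb", ".rpm", ".apk", ".appimage"] (by decide),
        inter_found_any (PySem.Str.lower name) ["win"] (by decide),
        inter_ends_any (PySem.Str.lower name) [".exe", ".msi", ".zip"] (by decide),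
        tails_eq, or_windows_win]
    have hkw : ((["win"] : List String).any (fun x => PySem.Str.isIn x (PySem.Str.lower name))) = (PySem.Str.isIn "win" (PySem.Str.lower name) || false) := rfl
    have hsf : (([".exe", ".msi", ".zip"] : List String).any (fun x => PySem.Str.endswith (PySem.Str.lower name) x)) = (PySem.Str.endswith (PySem.Str.lower name) ".exe" || (PySem.Str.endswith (PySem.Str.lower name) ".msi" || (PySem.Str.endswith (PySem.Str.lower name) ".zip" || false))) := rfl
    rw [hkw, hsf]
    generalize idA_tail (PySem.Str.lower name) arch = T
    generalize ((["linux", "darwin", "mac", "freebsd", "apple", ".dmg", ".deb", ".rpm", ".apk", ".appimage"]).any (fun x => PySem.Str.isIn x (PySem.Str.lower name))) = E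
    generalize PySem.Str.isIn "win" (PySem.Str.lower name) = K
    generalize PySem.Str.endswith (PySem.Str.lower name) ".exe" = s1
    generalize PySem.Str.endswith (PySem.Str.lower name) ".msi" = s2
    generalize PySem.Str.endswith (PySem.Str.lower name) ".zip" = s3
    revert T E K s1 s2 s3; decide
  · by_cases h2 : os_name = "macos"
    · subst h2
      simp only [identify_asset, identify_asset_alt, osRules_macos]
      rw [if_neg (by decide : ¬("macos" : String) = "windows"), if_pos trivial]
      rw [inter_found_any (PySem.Str.lower name) ["windows", "win64", "win32", "linux", "freebsd", ".exe", ".msi", ".deb", ".rpm", ".apk", ".appimage"] (by decide),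
          inter_found_any (PySem.Str.lower name) ["mac", "darwin", "apple"] (by decide),
          inter_ends_any (PySem.Str.lower name) [".dmg", ".zip", ".tar.gz"] (by decide),
          tails_eq]
      have hkw : ((["mac", "darwin", "apple"] : List String).any (fun x => PySem.Str.isIn x (PySem.Str.lower name))) = (PySem.Str.isIn "mac" (PySem.Str.lower name) || (PySem.Str.isIn "darwin" (PySem.Str.lower name) || (PySem.Str.isIn "apple" (PySem.Str.lower name) || false))) := rfl
      have hsf : (([".dmg", ".zip", ".tar.gz"] : List String).any (fun x => PySem.Str.endswith (PySem.Str.lower name) x)) = (PySem.Str.endswith (PySem.Str.lower name) ".dmg" || (PySem.Str.endswith (PySem.Str.lower name) ".zip" || (PySem.Str.endswith (PySem.Str.lower name) ".tar.gz" || false))) := rfl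
      rw [hkw, hsf]
      generalize idA_tail (PySem.Str.lower name) arch = T
      generalize ((["windows", "win64", "win32", "linux", "freebsd", ".exe", ".msi", ".deb", ".rpm", ".apk", ".appimage"]).any (fun x => PySem.Str.isIn x (PySem.Str.lower name))) = E
      generalize PySem.Str.isIn "mac" (PySem.Str.lower name) = m
      generalize PySem.Str.isIn "darwin" (PySem.Str.lower name) = d
      generalize PySem.Str.isIn "apple" (PySem.Str.lower name) = a
      generalize PySem.Str.endswith (PySem.Str.lower name) ".dmg" = s1
      generalize PySem.Str.endswith (PySem.Str.lower name) ".zip" = s2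
      generalize PySem.Str.endswith (PySem.Str.lower name) ".tar.gz" = s3
      revert T E m d a s1 s2 s3; decide
    · by_cases h3 : os_name = "linux"
      · subst h3
        simp only [identify_asset, identify_asset_alt, osRules_linux]
        rw [if_neg (by decide : ¬("linux" : String) = "windows"), if_neg (by decide : ¬("linux" : String) = "macos"),
            if_pos trivial]
        rw [inter_found_any (PySem.Str.lower name) ["windows", "win64", "win32", "darwin", "mac", "apple", "freebsd", ".exe", ".msi", ".dmg"] (by decide),
            inter_found_any (PySem.Str.lower name) ["linux"] (by decide),
            inter_ends_any (PySem.Str.lower name) [".deb", ".rpm", ".appimage", ".apk", ".tar.gz", ".tar.xz"] (by decide),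
            tails_eq]
        have hkw : ((["linux"] : List String).any (fun x => PySem.Str.isIn x (PySem.Str.lower name))) = (PySem.Str.isIn "linux" (PySem.Str.lower name) || false) := rfl
        have hsf : (([".deb", ".rpm", ".appimage", ".apk", ".tar.gz", ".tar.xz"] : List String).any (fun x => PySem.Str.endswith (PySem.Str.lower name) x)) = (PySem.Str.endswith (PySem.Str.lower name) ".deb" || (PySem.Str.endswith (PySem.Str.lower name) ".rpm" || (PySem.Str.endswith (PySem.Str.lower name) ".appimage" || (PySem.Str.endswith (PySem.Str.lower name) ".apk" || (PySem.Str.endswith (PySem.Str.lower name) ".tar.gz" || (PySem.Str.endswith (PySem.Str.lower name) ".tar.xz" || false)))))) := rfl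
        rw [hkw, hsf]
        generalize idA_tail (PySem.Str.lower name) arch = T
        generalize ((["windows", "win64", "win32", "darwin", "mac", "apple", "freebsd", ".exe", ".msi", ".dmg"]).any (fun x => PySem.Str.isIn x (PySem.Str.lower name))) = E
        generalize PySem.Str.isIn "linux" (PySem.Str.lower name) = K
        generalize PySem.Str.endswith (PySem.Str.lower name) ".deb" = s1
        generalize PySem.Str.endswith (PySem.Str.lower name) ".rpm" = s2
        generalize PySem.Str.endswith (PySem.Str.lower name) ".appimage" = s3
        generalize PySem.Str.endswith (PySem.Str.lower name) ".apk" = s4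
        generalize PySem.Str.endswith (PySem.Str.lower name) ".tar.gz" = s5
        generalize PySem.Str.endswith (PySem.Str.lower name) ".tar.xz" = s6
        revert T E K s1 s2 s3 s4 s5 s6; decide
      · simp only [identify_asset, identify_asset_alt, osRules_none os_name h1 h2 h3,
                   if_neg h1, if_neg h2, if_neg h3]
        rw [tails_eq]
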